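-- pv_equiv track=rewrite | github.com/lkonig203/Hahn-Project | likely_tree.py | generate_alt
-- ===== SOURCE A (Python) =====
-- from collections import Counter
-- from itertools import permutations
--
-- def replacenodes(inTree, newordering):
--     currindex = 0
--     i = 0
--     letters = [item.split('_')[0] for item in newordering]
--     output = ""
--     while i < len(inTree):
--         if inTree[i].isalpha(): # if current index is a letter
--             if inTree[i] in letters:
--                 output = output + newordering[currindex]
--                 currindex = currindex + 1 # go to next item in newordering
--                 i = i + 3
--             else:
--                 output = output + inTree[i]
--                 i = i + 1
--         else:
--             output = output + inTree[i]
--             i = i + 1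
--     return output
--
-- def generate_alt(sampleTree): #output = list containing alternative trees
--     letter_list = [char for char in sampleTree if char.isalpha()]
--     letter_counts = Counter(letter_list)
--     duplicatedletters = []
--     result = []
--     if len(letter_list) <= 2 or max(list(letter_counts.values())) < 2:
--         result.append(sampleTree)
--         return result
--     for index, char in enumerate(sampleTree):
--         if char.isalpha():
--             if letter_counts[char] > 1: #Letter appears more than once
--                 duplicatedletters.append(char + sampleTree[index+1] + sampleTree[index+2])
--     possible_ordering = permutations(duplicatedletters)
--     for ordering in possible_ordering:
--         result.append(replacenodes(sampleTree, ordering))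
--     return result
-- ===== SOURCE B (Python) =====
-- from collections import Counter
-- from itertools import permutations
--
-- def generate_alt(sampleTree):
--     counts = Counter(c for c in sampleTree if c.isalpha())
--     if sum(counts.values()) <= 2 or max(counts.values()) < 2:
--         return [sampleTree]
--     nodes = [sampleTree[i:i + 3]
--              for i, c in enumerate(sampleTree)
--              if c.isalpha() and counts[c] > 1]
--     letters = {n.split('_')[0] for n in nodes}
--     # One pass: split the tree into constant segments around the node spans.
--     heads, buf, i, n = [], [], 0, len(sampleTree)
--     while i < n:
--         c = sampleTree[i]
--         if c.isalpha() and c in letters: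
--             heads.append(''.join(buf))
--             buf = []
--             i += 3
--         else:
--             buf.append(c)
--             i += 1
--     tail = ''.join(buf)
--     out = []
--     for p in permutations(nodes):
--         parts = []
--         for seg, node in zip(heads, p):
--             parts.append(seg)
--             parts.append(node)
--         parts.append(tail)
--         out.append(''.join(parts))
--     return out
-- ===== Notes on version B (the rewrite author's own statement) =====
-- stated objective: faster
-- what changed: Instead of re-scanning the whole string character by character for every permutation (replacenodes), B does one pass that splits the tree into the constant text segments around the duplicated-letter node spans, then builds each variant by zipping the segments with the permuted nodes and joining.
import Mathlib
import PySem

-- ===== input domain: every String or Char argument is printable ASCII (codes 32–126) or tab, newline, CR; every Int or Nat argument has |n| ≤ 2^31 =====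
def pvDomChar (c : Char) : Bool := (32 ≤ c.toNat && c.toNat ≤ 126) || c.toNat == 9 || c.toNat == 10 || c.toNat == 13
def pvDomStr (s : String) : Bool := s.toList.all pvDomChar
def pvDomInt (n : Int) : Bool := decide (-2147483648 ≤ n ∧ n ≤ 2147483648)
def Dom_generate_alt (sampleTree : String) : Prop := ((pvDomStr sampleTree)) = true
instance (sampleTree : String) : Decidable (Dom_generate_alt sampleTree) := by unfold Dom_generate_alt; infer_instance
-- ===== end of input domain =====

-- B precomputes the constant text segments around the duplicated-letter node spans in one pass and joins
-- them with each permutation, replacing A's per-permutation character scan (objective: faster; constant-factor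
-- mechanism, not measured because A raises on its large generated inputs).


-- ===== PORT A =====
-- item.split('_')[0], shared by both ports (split always returns a nonempty list)
def pvPrefix (item : List Char) : List Char := (PySem.Chars.splitOn item ['_']).headD []

-- the while-loop of replacenodes: i ↦ remaining suffix, currindex ↦ remaining newordering, output accumulator
def pvReplGo (letters : List (List Char)) (inTree : List Char) (rem : List (List Char))
    (output : List Char) : List Char :=
  match inTree with
  | [] => output
  | c :: t =>
    if PySem.Chars.isalpha c then
      if [c] ∈ letters then
        -- newordering[currindex]: never out of range for the orderings generate_alt passes in
        pvReplGo letters (t.drop 2) rem.tail (output ++ rem.headD [])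
      else pvReplGo letters t rem (output ++ [c])
    else pvReplGo letters t rem (output ++ [c])
termination_by inTree.length
decreasing_by
  all_goals simp

def replacenodesA (inTree : List Char) (newordering : List (List Char)) : List Char :=
  pvReplGo (newordering.map pvPrefix) inTree newordering []

def generate_alt (sampleTree : String) : List String :=
  let cs := sampleTree.toList
  let letter_list := cs.filter PySem.Chars.isalpha
  let letter_counts := PySem.Dict.counter letter_list
  -- max(list(values)): Python's `or` never evaluates it on an empty counter (len ≤ 2 fires first);
  -- the .getD 0 default is likewise never decisive
  if letter_list.length ≤ 2 ∨ (PySem.List.max? letter_counts.values (fun v => v)).getD 0 < 2 then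
    [sampleTree]
  else
    let duplicatedletters := (PySem.List.enumerate cs).foldl
      (fun acc p =>
        if PySem.Chars.isalpha p.2 then
          if letter_counts.getD p.2 0 > 1 then
            -- sampleTree[index+1] / sampleTree[index+2]: IndexError past the end; Pre_ excludes that,
            -- so the ' ' default is never read
            acc ++ [[p.2, (PySem.List.pyGet? cs (p.1 + 1)).getD ' ',
                          (PySem.List.pyGet? cs (p.1 + 2)).getD ' ']]
          else acc
        else acc) []
    (PySem.List.permutations duplicatedletters duplicatedletters.length).foldl
      (fun result ordering => result ++ [String.ofList (replacenodesA cs ordering)]) []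

-- ===== PORT B =====
-- one pass over the tree: constant segments (heads, tail) around the matched node spans
def pvScanB (letters : PySem.Set (List Char)) (t : List Char) (buf : List Char)
    (heads : List (List Char)) : List (List Char) × List Char :=
  match t with
  | [] => (heads, buf)
  | c :: rest =>
    if PySem.Chars.isalpha c && PySem.Set.contains letters [c] then
      pvScanB letters (rest.drop 2) [] (heads ++ [buf])
    else pvScanB letters rest (buf ++ [c]) heads
termination_by t.length
decreasing_by
  all_goals simp

-- ''.join of segments interleaved with the permuted nodes
def pvInterleave (heads : List (List Char)) (p : List (List Char)) (tail : List Char) : List Char :=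
  (heads.zip p).foldl (fun parts q => parts ++ q.1 ++ q.2) [] ++ tail

def generate_alt_alt (sampleTree : String) : List String :=
  let cs := sampleTree.toList
  let counts := PySem.Dict.counter (cs.filter PySem.Chars.isalpha)
  if counts.values.sum ≤ 2 ∨ (PySem.List.max? counts.values (fun v => v)).getD 0 < 2 then
    [sampleTree]
  else
    let nodes := (PySem.List.enumerate cs).foldl
      (fun acc p =>
        if PySem.Chars.isalpha p.2 && decide (counts.getD p.2 0 > 1) then
          acc ++ [PySem.List.slice cs (some p.1) (some (p.1 + 3))]
        else acc) []
    let letters := PySem.Set.ofList (nodes.map pvPrefix)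
    let hb := pvScanB letters cs [] []
    (PySem.List.permutations nodes nodes.length).foldl
      (fun out p => out ++ [String.ofList (pvInterleave hb.1 p hb.2)]) []

-- ===== PRECONDITION & SPEC =====
-- Pre_ excludes exactly the inputs where A raises IndexError: a letter that occurs more than once
-- sitting in the last two positions of the string (sampleTree[index+2] is past the end).
def Pre_generate_alt (sampleTree : String) : Prop :=
  let cs := sampleTree.toList
  let ll := cs.filter PySem.Chars.isalpha
  ll.length ≤ 2 ∨ (∀ c ∈ ll, ll.count c < 2) ∨
    (∀ c ∈ cs.drop (cs.length - 2), ¬(PySem.Chars.isalpha c = true ∧ ll.count c > 1))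
instance (sampleTree : String) : Decidable (Pre_generate_alt sampleTree) := by
  unfold Pre_generate_alt; infer_instance

def pvWitness_generate_alt : String := "ab"

def Spec_generate_alt (sampleTree : String) (out : List String) : Prop := out = generate_alt_alt sampleTree
instance (sampleTree : String) (out : List String) : Decidable (Spec_generate_alt sampleTree out) := by unfold Spec_generate_alt; infer_instance

-- ===== CLAIM (what is proved, stated in full; the proofs are below) =====
def Claim_equal_generate_alt : Prop := ∀ (sampleTree : String), Dom_generate_alt sampleTree → Pre_generate_alt sampleTree → Spec_generate_alt sampleTree (generate_alt sampleTree)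


-- ===== LEMMAS AND PROOFS =====

-- proof-only abbreviations (below-claim helpers)
def pvM (S : PySem.Set (List Char)) (c : Char) : Bool :=
  PySem.Chars.isalpha c && PySem.Set.contains S [c]

def pvG (counts : PySem.Dict Char Int) (c : Char) : Bool :=
  PySem.Chars.isalpha c && decide (counts.getD c 0 > 1)

-- scanB only appends to its heads accumulator
theorem pvScan_acc (S : PySem.Set (List Char)) :
    ∀ (n : Nat) (t : List Char), t.length ≤ n → ∀ (buf : List Char) (heads : List (List Char)),
      pvScanB S t buf heads = (heads ++ (pvScanB S t buf []).1, (pvScanB S t buf []).2) := by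
  intro n
  induction n with
  | zero =>
    intro t ht buf heads
    have : t = [] := List.eq_nil_of_length_eq_zero (Nat.le_zero.mp ht)
    subst this; simp [pvScanB]
  | succ n ih =>
    intro t ht buf heads
    match t with
    | [] => simp [pvScanB]
    | c :: rest =>
      rw [pvScanB, pvScanB]
      by_cases hc : (PySem.Chars.isalpha c && PySem.Set.contains S [c]) = true
      · rw [if_pos hc, if_pos hc]
        have h1 : (rest.drop 2).length ≤ n := by simp at ht ⊢; omega
        rw [ih _ h1 [] (heads ++ [buf]), ih _ h1 [] ([] ++ [buf])]
        simp
      · rw [if_neg hc, if_neg hc]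
        have h1 : rest.length ≤ n := by simp at ht; omega
        exact ih _ h1 (buf ++ [c]) heads

-- pvInterleave as flatMap, and its recursion equations
theorem pvInterleave_eq (heads p : List (List Char)) (tail : List Char) :
    pvInterleave heads p tail = (heads.zip p).flatMap (fun q => q.1 ++ q.2) ++ tail := by
  unfold pvInterleave
  have hf : (fun (parts : List Char) (q : List Char × List Char) => parts ++ q.1 ++ q.2)
      = (fun parts q => parts ++ (q.1 ++ q.2)) := by
    funext parts q; simp
  rw [hf, PySem.List.foldl_append_eq_flatMap]
  simp

theorem pvInterleave_nil (p : List (List Char)) (tail : List Char) :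
    pvInterleave [] p tail = tail := by
  simp [pvInterleave_eq]

theorem pvInterleave_cons (h : List Char) (hs : List (List Char)) (r : List Char)
    (rs : List (List Char)) (tail : List Char) :
    pvInterleave (h :: hs) (r :: rs) tail = h ++ r ++ pvInterleave hs rs tail := by
  simp [pvInterleave_eq]

-- the number of segments scanB cuts is bounded by the number of matching characters
theorem pvSlots_le (S : PySem.Set (List Char)) :
    ∀ (n : Nat) (t : List Char), t.length ≤ n → ∀ (buf : List Char),
      (pvScanB S t buf []).1.length ≤ t.countP (pvM S) := by
  intro n
  induction n with
  | zero =>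
    intro t ht buf
    have : t = [] := List.eq_nil_of_length_eq_zero (Nat.le_zero.mp ht)
    subst this; simp [pvScanB]
  | succ n ih =>
    intro t ht buf
    match t with
    | [] => simp [pvScanB]
    | c :: rest =>
      rw [pvScanB]
      by_cases hc : (PySem.Chars.isalpha c && PySem.Set.contains S [c]) = true
      · rw [if_pos hc]
        have h1 : (rest.drop 2).length ≤ n := by simp at ht ⊢; omega
        rw [pvScan_acc S n _ h1 [] ([] ++ [buf])]
        have h2 := ih _ h1 ([] : List Char)
        have h3 : (rest.drop 2).countP (pvM S) ≤ rest.countP (pvM S) :=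
          (List.drop_sublist 2 rest).countP_le
        have h4 : (c :: rest).countP (pvM S) = rest.countP (pvM S) + 1 := by
          rw [List.countP_cons_of_pos]; exact hc
        simp only [List.length_append, List.length_cons, List.length_nil, h4]
        omega
      · rw [if_neg hc]
        have h1 : rest.length ≤ n := by simp at ht; omega
        have h4 : (c :: rest).countP (pvM S) = rest.countP (pvM S) := by
          rw [List.countP_cons_of_neg]; exact hc
        rw [h4]
        exact ih _ h1 (buf ++ [c])

-- THE MAIN LEMMA: one replacenodes scan equals interleaving the precomputed segments
theorem pvRepl_main (L : List (List Char)) (S : PySem.Set (List Char))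
    (hm : ∀ c : Char, ([c] ∈ L) ↔ (PySem.Set.contains S [c] = true)) :
    ∀ (n : Nat) (t : List Char), t.length ≤ n →
      ∀ (rem : List (List Char)) (out buf : List Char),
        (pvScanB S t buf []).1.length ≤ rem.length →
        pvReplGo L t rem (out ++ buf) =
          out ++ pvInterleave (pvScanB S t buf []).1 rem (pvScanB S t buf []).2 := by
  intro n
  induction n with
  | zero =>
    intro t ht rem out buf _
    have : t = [] := List.eq_nil_of_length_eq_zero (Nat.le_zero.mp ht)
    subst this
    simp [pvScanB, pvReplGo, pvInterleave_nil]
  | succ n ih =>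
    intro t ht rem out buf hlen
    match t with
    | [] => simp [pvScanB, pvReplGo, pvInterleave_nil]
    | c :: rest =>
      rw [pvReplGo]
      have hstep : pvScanB S (c :: rest) buf [] =
          if (PySem.Chars.isalpha c && PySem.Set.contains S [c]) = true then
            pvScanB S (rest.drop 2) [] ([] ++ [buf])
          else pvScanB S rest (buf ++ [c]) [] := by
        rw [pvScanB]
      by_cases ha : PySem.Chars.isalpha c = true
      · rw [if_pos ha]
        by_cases hmem : [c] ∈ L
        · rw [if_pos hmem]
          have hc : (PySem.Chars.isalpha c && PySem.Set.contains S [c]) = true := by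
            rw [ha, (hm c).mp hmem]; rfl
          rw [hstep, if_pos hc] at hlen ⊢
          have h1 : (rest.drop 2).length ≤ n := by simp at ht ⊢; omega
          rw [pvScan_acc S n _ h1 [] ([] ++ [buf])] at hlen ⊢
          simp only [List.nil_append, List.singleton_append, List.length_cons] at hlen ⊢
          obtain ⟨r0, rem', rfl⟩ : ∃ r0 rem', rem = r0 :: rem' := by
            match rem with
            | [] => exfalso; simp at hlen
            | r0 :: rem' => exact ⟨r0, rem', rfl⟩
          simp only [List.length_cons] at hlen
          have hlen' : (pvScanB S (rest.drop 2) [] []).1.length ≤ rem'.length := by omega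
          have hrec := ih _ h1 rem' (out ++ buf ++ r0) ([] : List Char)
            (by simpa using hlen')
          simp only [List.append_nil] at hrec
          rw [show (r0 :: rem').headD [] = r0 from rfl,
              show (r0 :: rem').tail = rem' from rfl, hrec, pvInterleave_cons]
          simp
        · rw [if_neg hmem]
          have hc : ¬((PySem.Chars.isalpha c && PySem.Set.contains S [c]) = true) := by
            intro hcontra
            rw [Bool.and_eq_true] at hcontra
            exact hmem ((hm c).mpr hcontra.2)
          rw [hstep, if_neg hc] at hlen ⊢
          have h1 : rest.length ≤ n := by simp at ht; omega
          have hrec := ih _ h1 rem out (buf ++ [c]) hlen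
          rw [← List.append_assoc] at hrec
          exact hrec
      · rw [if_neg ha]
        have hc : ¬((PySem.Chars.isalpha c && PySem.Set.contains S [c]) = true) := by
          intro hcontra
          rw [Bool.and_eq_true] at hcontra
          exact ha hcontra.1
        rw [hstep, if_neg hc] at hlen ⊢
        have h1 : rest.length ≤ n := by simp at ht; omega
        have hrec := ih _ h1 rem out (buf ++ [c]) hlen
        rw [← List.append_assoc] at hrec
        exact hrec

-- splitOn.go: the accumulator is emitted in front, reversed
theorem pvGo_acc (sep : List Char) :
    ∀ (fuel : Nat) (l cur : List Char) (acc : List (List Char)),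
      PySem.Chars.splitOn.go sep fuel l cur acc =
        acc.reverse ++ PySem.Chars.splitOn.go sep fuel l cur [] := by
  intro fuel
  induction fuel with
  | zero => intro l cur acc; simp [PySem.Chars.splitOn.go]
  | succ fuel ih =>
    intro l cur acc
    match l with
    | [] => simp [PySem.Chars.splitOn.go]
    | c :: rest =>
      rw [PySem.Chars.splitOn.go, PySem.Chars.splitOn.go]
      by_cases hp : sep.isPrefixOf (c :: rest) = true
      · rw [if_pos hp, if_pos hp, ih _ [] (cur.reverse :: acc), ih _ [] [cur.reverse]]
        simp
      · rw [if_neg hp, if_neg hp]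
        exact ih rest (c :: cur) acc

-- the first piece of splitOn.go extends cur.reverse
theorem pvGo_head (sep : List Char) :
    ∀ (fuel : Nat) (l cur : List Char),
      ∃ u, (PySem.Chars.splitOn.go sep fuel l cur []).headD [] = cur.reverse ++ u := by
  intro fuel
  induction fuel with
  | zero => intro l cur; exact ⟨l, by simp [PySem.Chars.splitOn.go]⟩
  | succ fuel ih =>
    intro l cur
    match l with
    | [] => exact ⟨[], by simp [PySem.Chars.splitOn.go]⟩
    | c :: rest =>
      rw [PySem.Chars.splitOn.go]
      by_cases hp : sep.isPrefixOf (c :: rest) = true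
      · rw [if_pos hp, pvGo_acc]
        exact ⟨[], by simp⟩
      · rw [if_neg hp]
        obtain ⟨u, hu⟩ := ih rest (c :: cur)
        exact ⟨c :: u, by simp at hu; simp [hu]⟩

-- split('_')[0] of a string starting with a non-underscore starts with that character
theorem pvPrefix_head (d : Char) (rest : List Char) (hd : d ≠ '_') :
    ∃ u, pvPrefix (d :: rest) = d :: u := by
  unfold pvPrefix PySem.Chars.splitOn
  rw [PySem.Chars.splitOn.go]
  have hp : ¬((['_'].isPrefixOf (d :: rest)) = true) := by
    simp [List.isPrefixOf]
    exact fun h => hd h.symm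
  rw [if_neg hp]
  obtain ⟨u, hu⟩ := pvGo_head ['_'] (rest.length + 1) rest [d]
  exact ⟨u, by simpa using hu⟩

-- the sum of a counter's values is the length of the counted list
theorem pvValuesSum (xs : List Char) :
    (PySem.Dict.counter xs).values.sum = (xs.length : Int) := by
  have hv : (PySem.Dict.counter xs).values
      = (PySem.Set.ofList xs).map (fun k => (List.count k xs : Int)) := by
    simp [PySem.Dict.values, PySem.Dict.items_counter]
  have hperm : (PySem.Set.ofList xs).Perm xs.dedup := by
    apply List.perm_of_nodup_nodup_toFinset_eq (PySem.Set.nodup_ofList xs) (List.nodup_dedup xs)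
    ext a
    simp [List.mem_toFinset, PySem.Set.mem_ofList, List.mem_dedup]
  calc (PySem.Dict.counter xs).values.sum
      = ((PySem.Set.ofList xs).map (fun k => (List.count k xs : Int))).sum := by rw [hv]
    _ = (xs.dedup.map (fun k => (List.count k xs : Int))).sum := (hperm.map _).sum_eq
    _ = (((xs.dedup.map (fun k => List.count k xs)).sum : Nat) : Int) := by
        rw [Nat.cast_list_sum, List.map_map]; rfl
    _ = (xs.length : Int) := by rw [List.sum_map_count_dedup_eq_length]

-- counter values as counts over the distinct elements
theorem pvValues_counter (xs : List Char) :
    (PySem.Dict.counter xs).values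
      = (PySem.Set.ofList xs).map (fun k => (List.count k xs : Int)) := by
  simp [PySem.Dict.values, PySem.Dict.items_counter]

def pvNodeA (cs : List Char) (p : Int × Char) : List Char :=
  [p.2, (PySem.List.pyGet? cs (p.1 + 1)).getD ' ', (PySem.List.pyGet? cs (p.1 + 2)).getD ' ']

def pvNodeB (cs : List Char) (p : Int × Char) : List Char :=
  PySem.List.slice cs (some p.1) (some (p.1 + 3))

def pvNodesB (cs : List Char) : List (List Char) :=
  ((PySem.List.enumerate cs).filter (fun p => pvG (PySem.Dict.counter (cs.filter PySem.Chars.isalpha)) p.2)).map (pvNodeB cs)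

-- A's duplicatedletters fold in filter/map form
theorem pvFoldA_eq (cs : List Char) :
    (PySem.List.enumerate cs).foldl
      (fun acc p =>
        if PySem.Chars.isalpha p.2 then
          if (PySem.Dict.counter (cs.filter PySem.Chars.isalpha)).getD p.2 0 > 1 then acc ++ [pvNodeA cs p] else acc
        else acc) []
    = ((PySem.List.enumerate cs).filter (fun p => pvG (PySem.Dict.counter (cs.filter PySem.Chars.isalpha)) p.2)).map (pvNodeA cs) := by
  have hf : (fun (acc : List (List Char)) (p : Int × Char) =>
        if PySem.Chars.isalpha p.2 then
          if (PySem.Dict.counter (cs.filter PySem.Chars.isalpha)).getD p.2 0 > 1 then acc ++ [pvNodeA cs p] else acc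
        else acc)
      = (fun acc p => if pvG (PySem.Dict.counter (cs.filter PySem.Chars.isalpha)) p.2 = true then acc ++ [pvNodeA cs p] else acc) := by
    funext acc p
    by_cases h1 : PySem.Chars.isalpha p.2 = true <;>
      by_cases h2 : (PySem.Dict.counter (cs.filter PySem.Chars.isalpha)).getD p.2 0 > 1 <;>
        simp [pvG, h1, h2]
  rw [hf, PySem.List.foldl_append_if]
  simp


-- B's nodes fold in filter/map form
theorem pvFoldB_eq (cs : List Char) :
    (PySem.List.enumerate cs).foldl
      (fun acc p =>
        if PySem.Chars.isalpha p.2 && decide ((PySem.Dict.counter (cs.filter PySem.Chars.isalpha)).getD p.2 0 > 1) then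
          acc ++ [pvNodeB cs p] else acc) []
    = pvNodesB cs := by
  rw [PySem.List.foldl_append_if]
  simp only [List.nil_append, pvNodesB, pvG]


-- under the no-trailing-duplicate precondition the two node constructions agree
theorem pvNodes_eq (cs : List Char)
    (hPre3 : ∀ (k : Nat) (hk : k < cs.length),
      PySem.Chars.isalpha cs[k] = true → 1 < (cs.filter PySem.Chars.isalpha).count cs[k] →
        k + 2 < cs.length) :
    ((PySem.List.enumerate cs).filter (fun p => pvG (PySem.Dict.counter (cs.filter PySem.Chars.isalpha)) p.2)).map (pvNodeA cs)
      = pvNodesB cs := by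
  unfold pvNodesB
  apply List.map_congr_left
  intro p hp
  rw [List.mem_filter] at hp
  obtain ⟨hpmem, hguard⟩ := hp
  rw [PySem.List.mem_enumerate_iff] at hpmem
  obtain ⟨k, hk, rfl⟩ := hpmem
  simp only [pvG, Bool.and_eq_true, decide_eq_true_eq] at hguard
  obtain ⟨halpha, hcount⟩ := hguard
  have hcount' : 1 < (cs.filter PySem.Chars.isalpha).count cs[k] := by
    rw [PySem.Dict.getD_counter] at hcount
    exact_mod_cast hcount
  have hk2 : k + 2 < cs.length := hPre3 k hk halpha hcount'
  have hdrop : cs.drop k = cs[k] :: cs[k+1] :: cs[k+2] :: cs.drop (k+3) := by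
    rw [List.drop_eq_getElem_cons (by omega), List.drop_eq_getElem_cons (by omega),
        List.drop_eq_getElem_cons (by omega)]
  have hB : pvNodeB cs ((0:Int) + k, cs[k]) = [cs[k], cs[k+1], cs[k+2]] := by
    unfold pvNodeB
    have h3 : ((3:Int)) = ((3:Nat):Int) := by norm_num
    simp only [zero_add]
    rw [h3, PySem.List.slice_natCast_add, hdrop]
    rfl
  have hA : pvNodeA cs ((0:Int) + k, cs[k]) = [cs[k], cs[k+1], cs[k+2]] := by
    unfold pvNodeA
    have e1 : ((0:Int) + k) + 1 = ((k+1 : Nat) : Int) := by push_cast; ring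
    have e2 : ((0:Int) + k) + 2 = ((k+2 : Nat) : Int) := by push_cast; ring
    simp only [e1, e2, PySem.List.pyGet?_natCast]
    rw [List.getElem?_eq_getElem (by omega), List.getElem?_eq_getElem (by omega)]
    rfl
  rw [hA, hB]

-- every node's prefix letter is a duplicated alpha character
theorem pvMemG (cs : List Char) (c : Char)
    (hmem : [c] ∈ (pvNodesB cs).map pvPrefix) : pvG (PySem.Dict.counter (cs.filter PySem.Chars.isalpha)) c = true := by
  rw [List.mem_map] at hmem
  obtain ⟨nd, hnd, hpre⟩ := hmem
  unfold pvNodesB at hnd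
  rw [List.mem_map] at hnd
  obtain ⟨p, hpfil, rfl⟩ := hnd
  rw [List.mem_filter] at hpfil
  obtain ⟨hpmem, hguard⟩ := hpfil
  rw [PySem.List.mem_enumerate_iff] at hpmem
  obtain ⟨k, hk, rfl⟩ := hpmem
  simp only [pvG, Bool.and_eq_true, decide_eq_true_eq] at hguard
  obtain ⟨halpha, hcount⟩ := hguard
  have hB : pvNodeB cs ((0:Int)+k, cs[k]) = cs[k] :: (cs.drop (k+1)).take 2 := by
    unfold pvNodeB
    have h3 : ((3:Int)) = ((3:Nat):Int) := by norm_num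
    simp only [zero_add]
    rw [h3, PySem.List.slice_natCast_add, List.drop_eq_getElem_cons hk]
    rfl
  rw [hB] at hpre
  have hne : cs[k] ≠ '_' := by
    intro he
    rw [he] at halpha
    exact absurd halpha (by decide)
  obtain ⟨u, hu⟩ := pvPrefix_head cs[k] ((cs.drop (k+1)).take 2) hne
  rw [hu] at hpre
  have hc : c = cs[k] := by
    have := (List.cons.injEq _ _ _ _).mp hpre
    exact this.1.symm
  subst hc
  simp only [pvG, Bool.and_eq_true, decide_eq_true_eq]
  exact ⟨halpha, hcount⟩

-- the number of matching characters is at most the number of nodes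
theorem pvCount_le (cs : List Char) :
    cs.countP (pvM (PySem.Set.ofList ((pvNodesB cs).map pvPrefix))) ≤ (pvNodesB cs).length := by
  have hlen : (pvNodesB cs).length
      = (PySem.List.enumerate cs).countP (fun p => pvG (PySem.Dict.counter (cs.filter PySem.Chars.isalpha)) p.2) := by
    unfold pvNodesB
    rw [List.length_map]
    exact (List.countP_eq_length_filter ..).symm
  have hcs : (PySem.List.enumerate cs).countP (fun p => pvG (PySem.Dict.counter (cs.filter PySem.Chars.isalpha)) p.2)
      = cs.countP (fun c => pvG (PySem.Dict.counter (cs.filter PySem.Chars.isalpha)) c) := by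
    have h := List.countP_map (p := fun c => pvG (PySem.Dict.counter (cs.filter PySem.Chars.isalpha)) c)
      (f := fun (p : Int × Char) => p.2) (l := PySem.List.enumerate cs)
    rw [PySem.List.map_snd_enumerate] at h
    rw [h]
    rfl
  rw [hlen, hcs]
  apply List.countP_mono_left
  intro c _ hm'
  simp only [pvM, Bool.and_eq_true] at hm'
  obtain ⟨halpha, hcontains⟩ := hm'
  have hmem : [c] ∈ (pvNodesB cs).map pvPrefix := by
    rw [← PySem.Set.mem_ofList ((pvNodesB cs).map pvPrefix) [c]]
    exact List.contains_iff_mem.mp hcontains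
  exact pvMemG cs c hmem

-- if every letter occurs at most once, the max counter value is below 2
theorem pvMaxlt (xs : List Char) (h : ∀ c ∈ xs, xs.count c < 2) :
    (PySem.List.max? (PySem.Dict.counter xs).values (fun v => v)).getD 0 < 2 := by
  cases hmax : PySem.List.max? (PySem.Dict.counter xs).values (fun v => v) with
  | none => norm_num
  | some m =>
    simp only [Option.getD_some]
    have hmem := PySem.List.max?_mem hmax
    rw [pvValues_counter] at hmem
    rw [List.mem_map] at hmem
    obtain ⟨k, hkmem, rfl⟩ := hmem
    have hkxs : k ∈ xs := (PySem.Set.mem_ofList xs k).mp hkmem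
    have := h k hkxs
    exact_mod_cast this

-- the two early-return guards are equivalent
theorem pvGuard_iff (cs : List Char) :
    ((cs.filter PySem.Chars.isalpha).length ≤ 2 ∨
      (PySem.List.max? (PySem.Dict.counter (cs.filter PySem.Chars.isalpha)).values (fun v => v)).getD 0 < 2)
    ↔ ((PySem.Dict.counter (cs.filter PySem.Chars.isalpha)).values.sum ≤ 2 ∨
      (PySem.List.max? (PySem.Dict.counter (cs.filter PySem.Chars.isalpha)).values (fun v => v)).getD 0 < 2) := by
  rw [pvValuesSum]
  constructor
  · rintro (h | h)
    · left; exact_mod_cast h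
    · right; exact h
  · rintro (h | h)
    · left; exact_mod_cast h
    · right; exact h

-- ===== VERDICT (by name: the statement is the Claim_ definition above) =====
-- B's letters set and A's per-ordering letters list test the same characters
theorem pvHm (nodes p : List (List Char)) (hperm : p.Perm nodes) (c : Char) :
    ([c] ∈ p.map pvPrefix)
      ↔ (PySem.Set.contains (PySem.Set.ofList (nodes.map pvPrefix)) [c] = true) := by
  constructor
  · intro h
    have := (hperm.map pvPrefix).mem_iff.mp h
    exact List.contains_iff_mem.mpr ((PySem.Set.mem_ofList _ _).mpr this)
  · intro h
    have := (PySem.Set.mem_ofList _ _).mp (List.contains_iff_mem.mp h)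
    exact (hperm.map pvPrefix).mem_iff.mpr this

theorem generate_alt_spec : Claim_equal_generate_alt := by
  intro s _ hpre
  unfold Spec_generate_alt generate_alt generate_alt_alt
  simp only []
  by_cases hg : (s.toList.filter PySem.Chars.isalpha).length ≤ 2 ∨
      (PySem.List.max? (PySem.Dict.counter (s.toList.filter PySem.Chars.isalpha)).values
        (fun v => v)).getD 0 < 2
  · rw [if_pos hg, if_pos ((pvGuard_iff s.toList).mp hg)]
  · rw [if_neg hg, if_neg (fun hb => hg ((pvGuard_iff s.toList).mpr hb))]
    push Not at hg
    obtain ⟨hg1, hg2⟩ := hg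
    -- extract the third disjunct of Pre_
    unfold Pre_generate_alt at hpre
    simp only [] at hpre
    have h3 : ∀ c ∈ s.toList.drop (s.toList.length - 2),
        ¬(PySem.Chars.isalpha c = true ∧ (s.toList.filter PySem.Chars.isalpha).count c > 1) := by
      rcases hpre with h | h | h
      · exact absurd h (by omega)
      · exact absurd (pvMaxlt _ h) (by omega)
      · exact h
    have hPre3 : ∀ (k : Nat) (hk : k < s.toList.length),
        PySem.Chars.isalpha s.toList[k] = true →
        1 < (s.toList.filter PySem.Chars.isalpha).count s.toList[k] →
        k + 2 < s.toList.length := by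
      intro k hk ha hc
      by_contra hcon
      push Not at hcon
      have hge : s.toList.length - 2 ≤ k := by omega
      have hmem : s.toList[k] ∈ s.toList.drop (s.toList.length - 2) := by
        have hlt : k - (s.toList.length - 2) < (s.toList.drop (s.toList.length - 2)).length := by
          rw [List.length_drop]; omega
        have : (s.toList.drop (s.toList.length - 2))[k - (s.toList.length - 2)] = s.toList[k] := by
          rw [List.getElem_drop]
          congr 1
          omega
        rw [← this]
        exact List.getElem_mem hlt
      exact h3 s.toList[k] hmem ⟨ha, hc⟩
    -- rewrite both node constructions to pvNodesB
    have hA := pvFoldA_eq s.toList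
    have hN := pvNodes_eq s.toList hPre3
    have hB := pvFoldB_eq s.toList
    simp only [pvNodeA, pvNodeB] at hA hN hB
    rw [hA, hN]
    rw [hB]
    -- both permutation loops, element by element
    rw [PySem.List.foldl_append_singleton_eq_map, PySem.List.foldl_append_singleton_eq_map]
    simp only [List.nil_append]
    apply List.map_congr_left
    intro p hp
    have hperm := PySem.List.perm_of_mem_permutations hp
    congr 1
    unfold replacenodesA
    have hm := pvHm (pvNodesB s.toList) p hperm
    have hlen : (pvScanB (PySem.Set.ofList ((pvNodesB s.toList).map pvPrefix))
        s.toList [] []).1.length ≤ p.length := by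
      refine le_trans (pvSlots_le _ s.toList.length s.toList le_rfl []) ?_
      rw [hperm.length_eq]
      exact pvCount_le s.toList
    have hmain := pvRepl_main (p.map pvPrefix)
      (PySem.Set.ofList ((pvNodesB s.toList).map pvPrefix)) hm
      s.toList.length s.toList le_rfl p [] [] hlen
    simp only [List.append_nil, List.nil_append] at hmain
    exact hmain
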